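-- pv_equiv track=rewrite | github.com/kimyoonduk/nyt-puzzle-solver | strands.py | get_adjacent_pairs
-- ===== SOURCE A (Python) =====
-- DIRECTIONS_8 = [(-1, 0), (1, 0), (0, -1), (0, 1), (-1, -1), (-1, 1), (1, -1), (1, 1)]
--
-- def get_adjacent_pairs(matrix):
--     n = len(matrix)
--     m = len(matrix[0])
--     pairs = set()
--
--     for i in range(n):
--         for j in range(m):
--             for dx, dy in DIRECTIONS_8:
--                 ni, nj = i + dx, j + dy
--                 if 0 <= ni < n and 0 <= nj < m:
--                     pairs.add((matrix[i][j], matrix[ni][nj]))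
--                     pairs.add(
--                         (matrix[ni][nj], matrix[i][j])
--                     )  # Add reverse pair as well
--
--     return pairs
-- ===== SOURCE B (Python) =====
-- def get_adjacent_pairs(matrix):
--     m = len(matrix[0])  # raises IndexError on an empty matrix, like the original
--     grid = [row[:m] for row in matrix]  # the grid is n x m (m = width of the first row)
--     nones = [None] * m
--     pairs = set()
--
--     def add(a, b):
--         pairs.add((a, b))
--         pairs.add((b, a))
--
--     # Sentinel padding + sliding zip windows: no index arithmetic, no bounds
--     # checks, no direction-offset list.  'vert' pads the grid with a row of
--     # Nones above and below, so zipping three consecutive rows gives each cell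
--     # its up/down neighbours; within a row a one-column lookahead (nxt) and a
--     # one-column memory (lu, la, ld) give the left/right/diagonal neighbours.
--     vert = [nones] + grid + [nones]
--     for up, row, down in zip(vert, grid, vert[2:]):
--         lu = la = ld = None
--         cols = list(zip(up, row, down))
--         for (u, a, d), (ru, ra, rd) in zip(cols, cols[1:] + [(None, None, None)]):
--             if u is not None:
--                 add(a, u)        # up
--             if d is not None:
--                 add(a, d)        # down
--             if la is not None:
--                 add(a, la)       # left
--             if ra is not None:
--                 add(a, ra)       # right
--             if lu is not None:
--                 add(a, lu)       # up-left
--             if ru is not None: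
--                 add(a, ru)       # up-right
--             if ld is not None:
--                 add(a, ld)       # down-left
--             if rd is not None:
--                 add(a, rd)       # down-right
--             lu, la, ld = u, a, d
--     return pairs
-- ===== Notes on version B (the rewrite author's own statement) =====
-- stated objective: alternative
-- what changed: B replaces A's index-arithmetic scan (per-cell loop over an 8-offset direction list with explicit bounds checks) by sentinel padding and sliding zip windows: the grid is padded with a row of None above and below, three consecutive rows are zipped to give each cell its vertical neighbours, and a one-column zip lookahead plus a one-column memory give the horizontal and diagonal neighbours, so no indices, offsets or bounds tests occur at all.
import Mathlib
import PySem

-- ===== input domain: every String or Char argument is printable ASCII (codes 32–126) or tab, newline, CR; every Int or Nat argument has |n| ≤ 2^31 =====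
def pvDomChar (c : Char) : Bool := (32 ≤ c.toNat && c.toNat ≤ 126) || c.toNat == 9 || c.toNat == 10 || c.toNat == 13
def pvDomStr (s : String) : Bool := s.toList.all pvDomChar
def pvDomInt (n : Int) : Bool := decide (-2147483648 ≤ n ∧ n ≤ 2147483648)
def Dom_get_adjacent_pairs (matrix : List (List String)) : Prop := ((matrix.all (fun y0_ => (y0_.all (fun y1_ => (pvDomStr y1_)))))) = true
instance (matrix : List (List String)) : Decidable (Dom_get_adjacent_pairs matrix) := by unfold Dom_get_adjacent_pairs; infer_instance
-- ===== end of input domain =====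

-- B replaces A's index-arithmetic 8-offset neighbour scan by sentinel padding and sliding
-- zip windows (no indices, offsets or bounds tests); return value proved equal on Pre_.

-- ===== PORT A =====
def DIRECTIONS_8 : List (Int × Int) := [(-1, 0), (1, 0), (0, -1), (0, 1), (-1, -1), (-1, 1), (1, -1), (1, 1)]

def get_adjacent_pairs (matrix : List (List String)) : List (String × String) :=
  let n : Int := matrix.length
  let m : Int := (PySem.List.pyGetD matrix 0 []).length
  (PySem.List.pyRange 0 n 1).foldl (fun pairs i =>
    (PySem.List.pyRange 0 m 1).foldl (fun pairs j =>
      DIRECTIONS_8.foldl (fun pairs d =>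
        if 0 ≤ i + d.1 ∧ i + d.1 < n ∧ 0 ≤ j + d.2 ∧ j + d.2 < m then
          PySem.Set.add
            (PySem.Set.add pairs
              (PySem.List.pyGetD (PySem.List.pyGetD matrix i []) j "",
               PySem.List.pyGetD (PySem.List.pyGetD matrix (i + d.1) []) (j + d.2) ""))
            (PySem.List.pyGetD (PySem.List.pyGetD matrix (i + d.1) []) (j + d.2) "",
             PySem.List.pyGetD (PySem.List.pyGetD matrix i []) j "")
        else pairs) pairs) pairs) []

-- ===== PORT B =====
-- B's helper add(a, b): insert both orientations
def pvAdd2 (pairs : PySem.Set (String × String)) (a b : String) : PySem.Set (String × String) :=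
  PySem.Set.add (PySem.Set.add pairs (a, b)) (b, a)

-- 'str or None' values are Option String; the padded (u, a, d) column triples and the
-- (None, None, None) sentinel are triples of Option String.
-- body of B's inner loop: state = (pairs, (lu, la, ld))
def pvWinStep (st : PySem.Set (String × String) × (Option String × Option String × Option String))
    (w : (Option String × Option String × Option String) ×
         (Option String × Option String × Option String)) :
    PySem.Set (String × String) × (Option String × Option String × Option String) :=
  let u := w.1.1; let a := w.1.2.1; let d := w.1.2.2
  let ru := w.2.1; let ra := w.2.2.1; let rd := w.2.2.2
  let lu := st.2.1; let la := st.2.2.1; let ld := st.2.2.2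
  match a with
  | none => (st.1, (u, a, d))  -- unreachable: the current cell is a real grid value, never the sentinel
  | some av =>
    let p := st.1
    let p := match u with | some x => pvAdd2 p av x | none => p    -- up
    let p := match d with | some x => pvAdd2 p av x | none => p    -- down
    let p := match la with | some x => pvAdd2 p av x | none => p   -- left
    let p := match ra with | some x => pvAdd2 p av x | none => p   -- right
    let p := match lu with | some x => pvAdd2 p av x | none => p   -- up-left
    let p := match ru with | some x => pvAdd2 p av x | none => p   -- up-right
    let p := match ld with | some x => pvAdd2 p av x | none => p   -- down-left
    let p := match rd with | some x => pvAdd2 p av x | none => p   -- down-right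
    (p, (u, a, d))

-- body of B's outer loop: one padded row window (up, row, down)
def pvRowStep (pairs : PySem.Set (String × String))
    (t : List (Option String) × (List (Option String) × List (Option String))) :
    PySem.Set (String × String) :=
  let cols := List.zip t.1 (List.zip t.2.1 t.2.2)
  ((List.zip cols (PySem.List.slice cols (some 1) none ++ [(none, none, none)])).foldl
    pvWinStep (pairs, (none, none, none))).1

def get_adjacent_pairs_alt (matrix : List (List String)) : List (String × String) :=
  let m : Int := (PySem.List.pyGetD matrix 0 []).length
  let grid : List (List (Option String)) :=
    matrix.map (fun row => (PySem.List.slice row none (some m)).map some)  -- row[:m], values wrapped as 'some'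
  let nones : List (Option String) := List.replicate m.toNat none
  let vert := [nones] ++ grid ++ [nones]
  (List.zip vert (List.zip grid (PySem.List.slice vert (some 2) none))).foldl pvRowStep []

-- ===== PRECONDITION & SPEC =====
-- A raises IndexError on an empty matrix (matrix[0]) and on a matrix with a row shorter
-- than the first row (matrix[ni][nj] for nj < len(matrix[0])); Pre_ excludes exactly those.
def Pre_get_adjacent_pairs (matrix : List (List String)) : Prop :=
  matrix ≠ [] ∧ ∀ row ∈ matrix, (PySem.List.pyGetD matrix 0 []).length ≤ row.length
instance (matrix : List (List String)) : Decidable (Pre_get_adjacent_pairs matrix) := by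
  unfold Pre_get_adjacent_pairs; infer_instance
def pvWitness_get_adjacent_pairs : List (List String) := [["a", "b"], ["c", "d"]]

def Spec_get_adjacent_pairs (matrix : List (List String)) (out : List (String × String)) : Prop := out = get_adjacent_pairs_alt matrix
instance (matrix : List (List String)) (out : List (String × String)) : Decidable (Spec_get_adjacent_pairs matrix out) := by unfold Spec_get_adjacent_pairs; infer_instance

-- ===== CLAIM (what is proved, stated in full; the proofs are below) =====
def Claim_equal_get_adjacent_pairs : Prop := ∀ (matrix : List (List String)), Dom_get_adjacent_pairs matrix → Pre_get_adjacent_pairs matrix → Spec_get_adjacent_pairs matrix (get_adjacent_pairs matrix)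

-- ===== LEMMAS AND PROOFS =====

-- width of the grid
def pvW (matrix : List (List String)) : Nat := (matrix.getD 0 []).length
-- row i truncated to the grid width (grid[i] unwrapped)
def pvTr (matrix : List (List String)) (i : Nat) : List String :=
  (matrix.getD i []).take (pvW matrix)
-- the value a cell's Option-triple carries for the cell above / below (i, j)
def pvUp (matrix : List (List String)) (i j : Nat) : Option String :=
  if i = 0 then none else some ((pvTr matrix (i - 1)).getD j "")
def pvDn (matrix : List (List String)) (i j : Nat) : Option String :=
  if i + 1 < matrix.length then some ((pvTr matrix (i + 1)).getD j "") else none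
-- the (u, a, d) column triple of cell (i, j)
def pvColT (matrix : List (List String)) (i j : Nat) :
    Option String × Option String × Option String :=
  (pvUp matrix i j, some ((pvTr matrix i).getD j ""), pvDn matrix i j)
def pvNxtT (matrix : List (List String)) (i j : Nat) :
    Option String × Option String × Option String :=
  if j + 1 < pvW matrix then pvColT matrix i (j + 1) else (none, none, none)
def pvPrvT (matrix : List (List String)) (i j : Nat) :
    Option String × Option String × Option String :=
  if j = 0 then (none, none, none) else pvColT matrix i (j - 1)

-- A's per-cell body (literally the inner lambda of port A)
def pvStepA (matrix : List (List String)) (n m i j : Int)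
    (pairs : PySem.Set (String × String)) : PySem.Set (String × String) :=
  DIRECTIONS_8.foldl (fun pairs d =>
    if 0 ≤ i + d.1 ∧ i + d.1 < n ∧ 0 ≤ j + d.2 ∧ j + d.2 < m then
      PySem.Set.add
        (PySem.Set.add pairs
          (PySem.List.pyGetD (PySem.List.pyGetD matrix i []) j "",
           PySem.List.pyGetD (PySem.List.pyGetD matrix (i + d.1) []) (j + d.2) ""))
        (PySem.List.pyGetD (PySem.List.pyGetD matrix (i + d.1) []) (j + d.2) "",
         PySem.List.pyGetD (PySem.List.pyGetD matrix i []) j "")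
    else pairs) pairs

lemma pvVal (matrix : List (List String))
    (hlen : ∀ row ∈ matrix, pvW matrix ≤ row.length)
    (a b : Nat) (ha : a < matrix.length) (hb : b < pvW matrix) :
    PySem.List.pyGetD (PySem.List.pyGetD matrix ((a : Nat) : Int) []) ((b : Nat) : Int) ""
      = (pvTr matrix a).getD b "" := by
  rw [PySem.List.pyGetD_natCast, PySem.List.pyGetD_natCast, pvTr]
  have hmem : matrix.getD a [] ∈ matrix := by
    rw [List.getD_eq_getElem?_getD, List.getElem?_eq_getElem ha]
    exact List.getElem_mem ha
  have hlb : b < (matrix.getD a []).length := lt_of_lt_of_le hb (hlen _ hmem)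
  simp only [List.getD_eq_getElem?_getD, List.getElem?_take_of_lt hb]


-- B's 'x is not None' add: insert both orientations when the neighbour exists
def pvOptAdd (p : PySem.Set (String × String)) (a : String) (o : Option String) :
    PySem.Set (String × String) :=
  match o with | some x => pvAdd2 p a x | none => p

-- the remaining five neighbour values of cell (i, j), as carried by B's window
def pvLa (matrix : List (List String)) (i j : Nat) : Option String :=
  if j = 0 then none else some ((pvTr matrix i).getD (j - 1) "")
def pvLu (matrix : List (List String)) (i j : Nat) : Option String :=
  if j = 0 then none else pvUp matrix i (j - 1)
def pvLd (matrix : List (List String)) (i j : Nat) : Option String :=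
  if j = 0 then none else pvDn matrix i (j - 1)
def pvRa (matrix : List (List String)) (i j : Nat) : Option String :=
  if j + 1 < pvW matrix then some ((pvTr matrix i).getD (j + 1) "") else none
def pvRu (matrix : List (List String)) (i j : Nat) : Option String :=
  if j + 1 < pvW matrix then pvUp matrix i (j + 1) else none
def pvRd (matrix : List (List String)) (i j : Nat) : Option String :=
  if j + 1 < pvW matrix then pvDn matrix i (j + 1) else none

-- the eight neighbour insertions of cell (i, j), in A's direction order
def pvChain (matrix : List (List String)) (i j : Nat)
    (s : PySem.Set (String × String)) : PySem.Set (String × String) :=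
  let av := (pvTr matrix i).getD j ""
  pvOptAdd (pvOptAdd (pvOptAdd (pvOptAdd (pvOptAdd (pvOptAdd (pvOptAdd (pvOptAdd s
    av (pvUp matrix i j)) av (pvDn matrix i j)) av (pvLa matrix i j)) av (pvRa matrix i j))
    av (pvLu matrix i j)) av (pvRu matrix i j)) av (pvLd matrix i j)) av (pvRd matrix i j)


lemma pvDirUp (matrix : List (List String))
    (hlen : ∀ row ∈ matrix, pvW matrix ≤ row.length)
    (i j : Nat) (hi : i < matrix.length) (hj : j < pvW matrix)
    (s : PySem.Set (String × String)) :
    (if 0 ≤ (i:Int) + -1 ∧ (i:Int) + -1 < (matrix.length:Int) ∧ 0 ≤ (j:Int) + 0 ∧ (j:Int) + 0 < (pvW matrix:Int) then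
      PySem.Set.add
        (PySem.Set.add s
          (PySem.List.pyGetD (PySem.List.pyGetD matrix (i:Int) []) (j:Int) "",
           PySem.List.pyGetD (PySem.List.pyGetD matrix ((i:Int) + -1) []) ((j:Int) + 0) ""))
        (PySem.List.pyGetD (PySem.List.pyGetD matrix ((i:Int) + -1) []) ((j:Int) + 0) "",
         PySem.List.pyGetD (PySem.List.pyGetD matrix (i:Int) []) (j:Int) "")
    else s)
      = pvOptAdd s ((pvTr matrix i).getD j "") (pvUp matrix i j) := by
  by_cases h1 : (pvUp matrix i j) = none
  · rw [if_neg, h1, pvOptAdd]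
    revert h1
    simp only [pvUp, pvDn, pvLa, pvRa, pvLu, pvLd, pvRu, pvRd]
    split_ifs <;> simp <;> omega
  · obtain ⟨x, hx⟩ := Option.ne_none_iff_exists'.mp h1
    have hcast1 : ((i:Int) + -1) = (((i-1) : Nat) : Int) := by
      first
        | omega
        | (revert hx
           simp only [pvUp, pvDn, pvLa, pvRa, pvLu, pvLd, pvRu, pvRd]
           split_ifs <;> intro hx <;>
             first | omega | (simp at hx; done) | (simp at hx; omega) | (simp at hx; exact hx.symm) | (simp only [List.getD_eq_getElem?_getD]; simp at hx; exact hx.symm))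
    have hcast2 : ((j:Int) + 0) = ((j : Nat) : Int) := by
      first
        | omega
        | (revert hx
           simp only [pvUp, pvDn, pvLa, pvRa, pvLu, pvLd, pvRu, pvRd]
           split_ifs <;> intro hx <;>
             first | omega | (simp at hx; done) | (simp at hx; omega) | (simp at hx; exact hx.symm) | (simp only [List.getD_eq_getElem?_getD]; simp at hx; exact hx.symm))
    have hb : (j : Nat) < pvW matrix := by
      first
        | omega
        | (revert hx
           simp only [pvUp, pvDn, pvLa, pvRa, pvLu, pvLd, pvRu, pvRd]
           split_ifs <;> intro hx <;>
             first | omega | (simp at hx; done) | (simp at hx; omega) | (simp at hx; exact hx.symm) | (simp only [List.getD_eq_getElem?_getD]; simp at hx; exact hx.symm))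
    have ha : ((i-1) : Nat) < matrix.length := by
      first
        | omega
        | (revert hx
           simp only [pvUp, pvDn, pvLa, pvRa, pvLu, pvLd, pvRu, pvRd]
           split_ifs <;> intro hx <;>
             first | omega | (simp at hx; done) | (simp at hx; omega) | (simp at hx; exact hx.symm) | (simp only [List.getD_eq_getElem?_getD]; simp at hx; exact hx.symm))
    have hxval : x = (pvTr matrix ((i-1))).getD (j) "" := by
      first
        | omega
        | (revert hx
           simp only [pvUp, pvDn, pvLa, pvRa, pvLu, pvLd, pvRu, pvRd]
           split_ifs <;> intro hx <;>
             first | omega | (simp at hx; done) | (simp at hx; omega) | (simp at hx; exact hx.symm) | (simp only [List.getD_eq_getElem?_getD]; simp at hx; exact hx.symm))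
    rw [if_pos, hx, pvOptAdd, hcast1, hcast2,
      pvVal matrix hlen i j hi hj, pvVal matrix hlen ((i-1)) (j) ha hb, hxval, pvAdd2]
    all_goals first
        | omega
        | (revert hx
           simp only [pvUp, pvDn, pvLa, pvRa, pvLu, pvLd, pvRu, pvRd]
           split_ifs <;> intro hx <;>
             first | omega | (simp at hx; done) | (simp at hx; omega) | (simp at hx; exact hx.symm) | (simp only [List.getD_eq_getElem?_getD]; simp at hx; exact hx.symm))


lemma pvDirDn (matrix : List (List String))
    (hlen : ∀ row ∈ matrix, pvW matrix ≤ row.length)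
    (i j : Nat) (hi : i < matrix.length) (hj : j < pvW matrix)
    (s : PySem.Set (String × String)) :
    (if 0 ≤ (i:Int) + 1 ∧ (i:Int) + 1 < (matrix.length:Int) ∧ 0 ≤ (j:Int) + 0 ∧ (j:Int) + 0 < (pvW matrix:Int) then
      PySem.Set.add
        (PySem.Set.add s
          (PySem.List.pyGetD (PySem.List.pyGetD matrix (i:Int) []) (j:Int) "",
           PySem.List.pyGetD (PySem.List.pyGetD matrix ((i:Int) + 1) []) ((j:Int) + 0) ""))
        (PySem.List.pyGetD (PySem.List.pyGetD matrix ((i:Int) + 1) []) ((j:Int) + 0) "",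
         PySem.List.pyGetD (PySem.List.pyGetD matrix (i:Int) []) (j:Int) "")
    else s)
      = pvOptAdd s ((pvTr matrix i).getD j "") (pvDn matrix i j) := by
  by_cases h1 : (pvDn matrix i j) = none
  · rw [if_neg, h1, pvOptAdd]
    revert h1
    simp only [pvUp, pvDn, pvLa, pvRa, pvLu, pvLd, pvRu, pvRd]
    split_ifs <;> simp <;> omega
  · obtain ⟨x, hx⟩ := Option.ne_none_iff_exists'.mp h1
    have hcast1 : ((i:Int) + 1) = (((i+1) : Nat) : Int) := by
      first
        | omega
        | (revert hx
           simp only [pvUp, pvDn, pvLa, pvRa, pvLu, pvLd, pvRu, pvRd]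
           split_ifs <;> intro hx <;>
             first | omega | (simp at hx; done) | (simp at hx; omega) | (simp at hx; exact hx.symm) | (simp only [List.getD_eq_getElem?_getD]; simp at hx; exact hx.symm))
    have hcast2 : ((j:Int) + 0) = ((j : Nat) : Int) := by
      first
        | omega
        | (revert hx
           simp only [pvUp, pvDn, pvLa, pvRa, pvLu, pvLd, pvRu, pvRd]
           split_ifs <;> intro hx <;>
             first | omega | (simp at hx; done) | (simp at hx; omega) | (simp at hx; exact hx.symm) | (simp only [List.getD_eq_getElem?_getD]; simp at hx; exact hx.symm))
    have hb : (j : Nat) < pvW matrix := by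
      first
        | omega
        | (revert hx
           simp only [pvUp, pvDn, pvLa, pvRa, pvLu, pvLd, pvRu, pvRd]
           split_ifs <;> intro hx <;>
             first | omega | (simp at hx; done) | (simp at hx; omega) | (simp at hx; exact hx.symm) | (simp only [List.getD_eq_getElem?_getD]; simp at hx; exact hx.symm))
    have ha : ((i+1) : Nat) < matrix.length := by
      first
        | omega
        | (revert hx
           simp only [pvUp, pvDn, pvLa, pvRa, pvLu, pvLd, pvRu, pvRd]
           split_ifs <;> intro hx <;>
             first | omega | (simp at hx; done) | (simp at hx; omega) | (simp at hx; exact hx.symm) | (simp only [List.getD_eq_getElem?_getD]; simp at hx; exact hx.symm))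
    have hxval : x = (pvTr matrix ((i+1))).getD (j) "" := by
      first
        | omega
        | (revert hx
           simp only [pvUp, pvDn, pvLa, pvRa, pvLu, pvLd, pvRu, pvRd]
           split_ifs <;> intro hx <;>
             first | omega | (simp at hx; done) | (simp at hx; omega) | (simp at hx; exact hx.symm) | (simp only [List.getD_eq_getElem?_getD]; simp at hx; exact hx.symm))
    rw [if_pos, hx, pvOptAdd, hcast1, hcast2,
      pvVal matrix hlen i j hi hj, pvVal matrix hlen ((i+1)) (j) ha hb, hxval, pvAdd2]
    all_goals first
        | omega
        | (revert hx
           simp only [pvUp, pvDn, pvLa, pvRa, pvLu, pvLd, pvRu, pvRd]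
           split_ifs <;> intro hx <;>
             first | omega | (simp at hx; done) | (simp at hx; omega) | (simp at hx; exact hx.symm) | (simp only [List.getD_eq_getElem?_getD]; simp at hx; exact hx.symm))


lemma pvDirLa (matrix : List (List String))
    (hlen : ∀ row ∈ matrix, pvW matrix ≤ row.length)
    (i j : Nat) (hi : i < matrix.length) (hj : j < pvW matrix)
    (s : PySem.Set (String × String)) :
    (if 0 ≤ (i:Int) + 0 ∧ (i:Int) + 0 < (matrix.length:Int) ∧ 0 ≤ (j:Int) + -1 ∧ (j:Int) + -1 < (pvW matrix:Int) then
      PySem.Set.add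
        (PySem.Set.add s
          (PySem.List.pyGetD (PySem.List.pyGetD matrix (i:Int) []) (j:Int) "",
           PySem.List.pyGetD (PySem.List.pyGetD matrix ((i:Int) + 0) []) ((j:Int) + -1) ""))
        (PySem.List.pyGetD (PySem.List.pyGetD matrix ((i:Int) + 0) []) ((j:Int) + -1) "",
         PySem.List.pyGetD (PySem.List.pyGetD matrix (i:Int) []) (j:Int) "")
    else s)
      = pvOptAdd s ((pvTr matrix i).getD j "") (pvLa matrix i j) := by
  by_cases h1 : (pvLa matrix i j) = none
  · rw [if_neg, h1, pvOptAdd]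
    revert h1
    simp only [pvUp, pvDn, pvLa, pvRa, pvLu, pvLd, pvRu, pvRd]
    split_ifs <;> simp <;> omega
  · obtain ⟨x, hx⟩ := Option.ne_none_iff_exists'.mp h1
    have hcast1 : ((i:Int) + 0) = ((i : Nat) : Int) := by
      first
        | omega
        | (revert hx
           simp only [pvUp, pvDn, pvLa, pvRa, pvLu, pvLd, pvRu, pvRd]
           split_ifs <;> intro hx <;>
             first | omega | (simp at hx; done) | (simp at hx; omega) | (simp at hx; exact hx.symm) | (simp only [List.getD_eq_getElem?_getD]; simp at hx; exact hx.symm))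
    have hcast2 : ((j:Int) + -1) = (((j-1) : Nat) : Int) := by
      first
        | omega
        | (revert hx
           simp only [pvUp, pvDn, pvLa, pvRa, pvLu, pvLd, pvRu, pvRd]
           split_ifs <;> intro hx <;>
             first | omega | (simp at hx; done) | (simp at hx; omega) | (simp at hx; exact hx.symm) | (simp only [List.getD_eq_getElem?_getD]; simp at hx; exact hx.symm))
    have hb : ((j-1) : Nat) < pvW matrix := by
      first
        | omega
        | (revert hx
           simp only [pvUp, pvDn, pvLa, pvRa, pvLu, pvLd, pvRu, pvRd]
           split_ifs <;> intro hx <;>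
             first | omega | (simp at hx; done) | (simp at hx; omega) | (simp at hx; exact hx.symm) | (simp only [List.getD_eq_getElem?_getD]; simp at hx; exact hx.symm))
    have ha : (i : Nat) < matrix.length := by
      first
        | omega
        | (revert hx
           simp only [pvUp, pvDn, pvLa, pvRa, pvLu, pvLd, pvRu, pvRd]
           split_ifs <;> intro hx <;>
             first | omega | (simp at hx; done) | (simp at hx; omega) | (simp at hx; exact hx.symm) | (simp only [List.getD_eq_getElem?_getD]; simp at hx; exact hx.symm))
    have hxval : x = (pvTr matrix (i)).getD ((j-1)) "" := by
      first
        | omega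
        | (revert hx
           simp only [pvUp, pvDn, pvLa, pvRa, pvLu, pvLd, pvRu, pvRd]
           split_ifs <;> intro hx <;>
             first | omega | (simp at hx; done) | (simp at hx; omega) | (simp at hx; exact hx.symm) | (simp only [List.getD_eq_getElem?_getD]; simp at hx; exact hx.symm))
    rw [if_pos, hx, pvOptAdd, hcast1, hcast2,
      pvVal matrix hlen i j hi hj, pvVal matrix hlen (i) ((j-1)) ha hb, hxval, pvAdd2]
    all_goals first
        | omega
        | (revert hx
           simp only [pvUp, pvDn, pvLa, pvRa, pvLu, pvLd, pvRu, pvRd]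
           split_ifs <;> intro hx <;>
             first | omega | (simp at hx; done) | (simp at hx; omega) | (simp at hx; exact hx.symm) | (simp only [List.getD_eq_getElem?_getD]; simp at hx; exact hx.symm))


lemma pvDirRa (matrix : List (List String))
    (hlen : ∀ row ∈ matrix, pvW matrix ≤ row.length)
    (i j : Nat) (hi : i < matrix.length) (hj : j < pvW matrix)
    (s : PySem.Set (String × String)) :
    (if 0 ≤ (i:Int) + 0 ∧ (i:Int) + 0 < (matrix.length:Int) ∧ 0 ≤ (j:Int) + 1 ∧ (j:Int) + 1 < (pvW matrix:Int) then
      PySem.Set.add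
        (PySem.Set.add s
          (PySem.List.pyGetD (PySem.List.pyGetD matrix (i:Int) []) (j:Int) "",
           PySem.List.pyGetD (PySem.List.pyGetD matrix ((i:Int) + 0) []) ((j:Int) + 1) ""))
        (PySem.List.pyGetD (PySem.List.pyGetD matrix ((i:Int) + 0) []) ((j:Int) + 1) "",
         PySem.List.pyGetD (PySem.List.pyGetD matrix (i:Int) []) (j:Int) "")
    else s)
      = pvOptAdd s ((pvTr matrix i).getD j "") (pvRa matrix i j) := by
  by_cases h1 : (pvRa matrix i j) = none
  · rw [if_neg, h1, pvOptAdd]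
    revert h1
    simp only [pvUp, pvDn, pvLa, pvRa, pvLu, pvLd, pvRu, pvRd]
    split_ifs <;> simp <;> omega
  · obtain ⟨x, hx⟩ := Option.ne_none_iff_exists'.mp h1
    have hcast1 : ((i:Int) + 0) = ((i : Nat) : Int) := by
      first
        | omega
        | (revert hx
           simp only [pvUp, pvDn, pvLa, pvRa, pvLu, pvLd, pvRu, pvRd]
           split_ifs <;> intro hx <;>
             first | omega | (simp at hx; done) | (simp at hx; omega) | (simp at hx; exact hx.symm) | (simp only [List.getD_eq_getElem?_getD]; simp at hx; exact hx.symm))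
    have hcast2 : ((j:Int) + 1) = (((j+1) : Nat) : Int) := by
      first
        | omega
        | (revert hx
           simp only [pvUp, pvDn, pvLa, pvRa, pvLu, pvLd, pvRu, pvRd]
           split_ifs <;> intro hx <;>
             first | omega | (simp at hx; done) | (simp at hx; omega) | (simp at hx; exact hx.symm) | (simp only [List.getD_eq_getElem?_getD]; simp at hx; exact hx.symm))
    have hb : ((j+1) : Nat) < pvW matrix := by
      first
        | omega
        | (revert hx
           simp only [pvUp, pvDn, pvLa, pvRa, pvLu, pvLd, pvRu, pvRd]
           split_ifs <;> intro hx <;>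
             first | omega | (simp at hx; done) | (simp at hx; omega) | (simp at hx; exact hx.symm) | (simp only [List.getD_eq_getElem?_getD]; simp at hx; exact hx.symm))
    have ha : (i : Nat) < matrix.length := by
      first
        | omega
        | (revert hx
           simp only [pvUp, pvDn, pvLa, pvRa, pvLu, pvLd, pvRu, pvRd]
           split_ifs <;> intro hx <;>
             first | omega | (simp at hx; done) | (simp at hx; omega) | (simp at hx; exact hx.symm) | (simp only [List.getD_eq_getElem?_getD]; simp at hx; exact hx.symm))
    have hxval : x = (pvTr matrix (i)).getD ((j+1)) "" := by
      first
        | omega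
        | (revert hx
           simp only [pvUp, pvDn, pvLa, pvRa, pvLu, pvLd, pvRu, pvRd]
           split_ifs <;> intro hx <;>
             first | omega | (simp at hx; done) | (simp at hx; omega) | (simp at hx; exact hx.symm) | (simp only [List.getD_eq_getElem?_getD]; simp at hx; exact hx.symm))
    rw [if_pos, hx, pvOptAdd, hcast1, hcast2,
      pvVal matrix hlen i j hi hj, pvVal matrix hlen (i) ((j+1)) ha hb, hxval, pvAdd2]
    all_goals first
        | omega
        | (revert hx
           simp only [pvUp, pvDn, pvLa, pvRa, pvLu, pvLd, pvRu, pvRd]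
           split_ifs <;> intro hx <;>
             first | omega | (simp at hx; done) | (simp at hx; omega) | (simp at hx; exact hx.symm) | (simp only [List.getD_eq_getElem?_getD]; simp at hx; exact hx.symm))


lemma pvDirLu (matrix : List (List String))
    (hlen : ∀ row ∈ matrix, pvW matrix ≤ row.length)
    (i j : Nat) (hi : i < matrix.length) (hj : j < pvW matrix)
    (s : PySem.Set (String × String)) :
    (if 0 ≤ (i:Int) + -1 ∧ (i:Int) + -1 < (matrix.length:Int) ∧ 0 ≤ (j:Int) + -1 ∧ (j:Int) + -1 < (pvW matrix:Int) then
      PySem.Set.add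
        (PySem.Set.add s
          (PySem.List.pyGetD (PySem.List.pyGetD matrix (i:Int) []) (j:Int) "",
           PySem.List.pyGetD (PySem.List.pyGetD matrix ((i:Int) + -1) []) ((j:Int) + -1) ""))
        (PySem.List.pyGetD (PySem.List.pyGetD matrix ((i:Int) + -1) []) ((j:Int) + -1) "",
         PySem.List.pyGetD (PySem.List.pyGetD matrix (i:Int) []) (j:Int) "")
    else s)
      = pvOptAdd s ((pvTr matrix i).getD j "") (pvLu matrix i j) := by
  by_cases h1 : (pvLu matrix i j) = none
  · rw [if_neg, h1, pvOptAdd]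
    revert h1
    simp only [pvUp, pvDn, pvLa, pvRa, pvLu, pvLd, pvRu, pvRd]
    split_ifs <;> simp <;> omega
  · obtain ⟨x, hx⟩ := Option.ne_none_iff_exists'.mp h1
    have hcast1 : ((i:Int) + -1) = (((i-1) : Nat) : Int) := by
      first
        | omega
        | (revert hx
           simp only [pvUp, pvDn, pvLa, pvRa, pvLu, pvLd, pvRu, pvRd]
           split_ifs <;> intro hx <;>
             first | omega | (simp at hx; done) | (simp at hx; omega) | (simp at hx; exact hx.symm) | (simp only [List.getD_eq_getElem?_getD]; simp at hx; exact hx.symm))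
    have hcast2 : ((j:Int) + -1) = (((j-1) : Nat) : Int) := by
      first
        | omega
        | (revert hx
           simp only [pvUp, pvDn, pvLa, pvRa, pvLu, pvLd, pvRu, pvRd]
           split_ifs <;> intro hx <;>
             first | omega | (simp at hx; done) | (simp at hx; omega) | (simp at hx; exact hx.symm) | (simp only [List.getD_eq_getElem?_getD]; simp at hx; exact hx.symm))
    have hb : ((j-1) : Nat) < pvW matrix := by
      first
        | omega
        | (revert hx
           simp only [pvUp, pvDn, pvLa, pvRa, pvLu, pvLd, pvRu, pvRd]
           split_ifs <;> intro hx <;>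
             first | omega | (simp at hx; done) | (simp at hx; omega) | (simp at hx; exact hx.symm) | (simp only [List.getD_eq_getElem?_getD]; simp at hx; exact hx.symm))
    have ha : ((i-1) : Nat) < matrix.length := by
      first
        | omega
        | (revert hx
           simp only [pvUp, pvDn, pvLa, pvRa, pvLu, pvLd, pvRu, pvRd]
           split_ifs <;> intro hx <;>
             first | omega | (simp at hx; done) | (simp at hx; omega) | (simp at hx; exact hx.symm) | (simp only [List.getD_eq_getElem?_getD]; simp at hx; exact hx.symm))
    have hxval : x = (pvTr matrix ((i-1))).getD ((j-1)) "" := by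
      first
        | omega
        | (revert hx
           simp only [pvUp, pvDn, pvLa, pvRa, pvLu, pvLd, pvRu, pvRd]
           split_ifs <;> intro hx <;>
             first | omega | (simp at hx; done) | (simp at hx; omega) | (simp at hx; exact hx.symm) | (simp only [List.getD_eq_getElem?_getD]; simp at hx; exact hx.symm))
    rw [if_pos, hx, pvOptAdd, hcast1, hcast2,
      pvVal matrix hlen i j hi hj, pvVal matrix hlen ((i-1)) ((j-1)) ha hb, hxval, pvAdd2]
    all_goals first
        | omega
        | (revert hx
           simp only [pvUp, pvDn, pvLa, pvRa, pvLu, pvLd, pvRu, pvRd]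
           split_ifs <;> intro hx <;>
             first | omega | (simp at hx; done) | (simp at hx; omega) | (simp at hx; exact hx.symm) | (simp only [List.getD_eq_getElem?_getD]; simp at hx; exact hx.symm))


lemma pvDirRu (matrix : List (List String))
    (hlen : ∀ row ∈ matrix, pvW matrix ≤ row.length)
    (i j : Nat) (hi : i < matrix.length) (hj : j < pvW matrix)
    (s : PySem.Set (String × String)) :
    (if 0 ≤ (i:Int) + -1 ∧ (i:Int) + -1 < (matrix.length:Int) ∧ 0 ≤ (j:Int) + 1 ∧ (j:Int) + 1 < (pvW matrix:Int) then
      PySem.Set.add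
        (PySem.Set.add s
          (PySem.List.pyGetD (PySem.List.pyGetD matrix (i:Int) []) (j:Int) "",
           PySem.List.pyGetD (PySem.List.pyGetD matrix ((i:Int) + -1) []) ((j:Int) + 1) ""))
        (PySem.List.pyGetD (PySem.List.pyGetD matrix ((i:Int) + -1) []) ((j:Int) + 1) "",
         PySem.List.pyGetD (PySem.List.pyGetD matrix (i:Int) []) (j:Int) "")
    else s)
      = pvOptAdd s ((pvTr matrix i).getD j "") (pvRu matrix i j) := by
  by_cases h1 : (pvRu matrix i j) = none
  · rw [if_neg, h1, pvOptAdd]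
    revert h1
    simp only [pvUp, pvDn, pvLa, pvRa, pvLu, pvLd, pvRu, pvRd]
    split_ifs <;> simp <;> omega
  · obtain ⟨x, hx⟩ := Option.ne_none_iff_exists'.mp h1
    have hcast1 : ((i:Int) + -1) = (((i-1) : Nat) : Int) := by
      first
        | omega
        | (revert hx
           simp only [pvUp, pvDn, pvLa, pvRa, pvLu, pvLd, pvRu, pvRd]
           split_ifs <;> intro hx <;>
             first | omega | (simp at hx; done) | (simp at hx; omega) | (simp at hx; exact hx.symm) | (simp only [List.getD_eq_getElem?_getD]; simp at hx; exact hx.symm))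
    have hcast2 : ((j:Int) + 1) = (((j+1) : Nat) : Int) := by
      first
        | omega
        | (revert hx
           simp only [pvUp, pvDn, pvLa, pvRa, pvLu, pvLd, pvRu, pvRd]
           split_ifs <;> intro hx <;>
             first | omega | (simp at hx; done) | (simp at hx; omega) | (simp at hx; exact hx.symm) | (simp only [List.getD_eq_getElem?_getD]; simp at hx; exact hx.symm))
    have hb : ((j+1) : Nat) < pvW matrix := by
      first
        | omega
        | (revert hx
           simp only [pvUp, pvDn, pvLa, pvRa, pvLu, pvLd, pvRu, pvRd]
           split_ifs <;> intro hx <;>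
             first | omega | (simp at hx; done) | (simp at hx; omega) | (simp at hx; exact hx.symm) | (simp only [List.getD_eq_getElem?_getD]; simp at hx; exact hx.symm))
    have ha : ((i-1) : Nat) < matrix.length := by
      first
        | omega
        | (revert hx
           simp only [pvUp, pvDn, pvLa, pvRa, pvLu, pvLd, pvRu, pvRd]
           split_ifs <;> intro hx <;>
             first | omega | (simp at hx; done) | (simp at hx; omega) | (simp at hx; exact hx.symm) | (simp only [List.getD_eq_getElem?_getD]; simp at hx; exact hx.symm))
    have hxval : x = (pvTr matrix ((i-1))).getD ((j+1)) "" := by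
      first
        | omega
        | (revert hx
           simp only [pvUp, pvDn, pvLa, pvRa, pvLu, pvLd, pvRu, pvRd]
           split_ifs <;> intro hx <;>
             first | omega | (simp at hx; done) | (simp at hx; omega) | (simp at hx; exact hx.symm) | (simp only [List.getD_eq_getElem?_getD]; simp at hx; exact hx.symm))
    rw [if_pos, hx, pvOptAdd, hcast1, hcast2,
      pvVal matrix hlen i j hi hj, pvVal matrix hlen ((i-1)) ((j+1)) ha hb, hxval, pvAdd2]
    all_goals first
        | omega
        | (revert hx
           simp only [pvUp, pvDn, pvLa, pvRa, pvLu, pvLd, pvRu, pvRd]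
           split_ifs <;> intro hx <;>
             first | omega | (simp at hx; done) | (simp at hx; omega) | (simp at hx; exact hx.symm) | (simp only [List.getD_eq_getElem?_getD]; simp at hx; exact hx.symm))


lemma pvDirLd (matrix : List (List String))
    (hlen : ∀ row ∈ matrix, pvW matrix ≤ row.length)
    (i j : Nat) (hi : i < matrix.length) (hj : j < pvW matrix)
    (s : PySem.Set (String × String)) :
    (if 0 ≤ (i:Int) + 1 ∧ (i:Int) + 1 < (matrix.length:Int) ∧ 0 ≤ (j:Int) + -1 ∧ (j:Int) + -1 < (pvW matrix:Int) then
      PySem.Set.add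
        (PySem.Set.add s
          (PySem.List.pyGetD (PySem.List.pyGetD matrix (i:Int) []) (j:Int) "",
           PySem.List.pyGetD (PySem.List.pyGetD matrix ((i:Int) + 1) []) ((j:Int) + -1) ""))
        (PySem.List.pyGetD (PySem.List.pyGetD matrix ((i:Int) + 1) []) ((j:Int) + -1) "",
         PySem.List.pyGetD (PySem.List.pyGetD matrix (i:Int) []) (j:Int) "")
    else s)
      = pvOptAdd s ((pvTr matrix i).getD j "") (pvLd matrix i j) := by
  by_cases h1 : (pvLd matrix i j) = none
  · rw [if_neg, h1, pvOptAdd]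
    revert h1
    simp only [pvUp, pvDn, pvLa, pvRa, pvLu, pvLd, pvRu, pvRd]
    split_ifs <;> simp <;> omega
  · obtain ⟨x, hx⟩ := Option.ne_none_iff_exists'.mp h1
    have hcast1 : ((i:Int) + 1) = (((i+1) : Nat) : Int) := by
      first
        | omega
        | (revert hx
           simp only [pvUp, pvDn, pvLa, pvRa, pvLu, pvLd, pvRu, pvRd]
           split_ifs <;> intro hx <;>
             first | omega | (simp at hx; done) | (simp at hx; omega) | (simp at hx; exact hx.symm) | (simp only [List.getD_eq_getElem?_getD]; simp at hx; exact hx.symm))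
    have hcast2 : ((j:Int) + -1) = (((j-1) : Nat) : Int) := by
      first
        | omega
        | (revert hx
           simp only [pvUp, pvDn, pvLa, pvRa, pvLu, pvLd, pvRu, pvRd]
           split_ifs <;> intro hx <;>
             first | omega | (simp at hx; done) | (simp at hx; omega) | (simp at hx; exact hx.symm) | (simp only [List.getD_eq_getElem?_getD]; simp at hx; exact hx.symm))
    have hb : ((j-1) : Nat) < pvW matrix := by
      first
        | omega
        | (revert hx
           simp only [pvUp, pvDn, pvLa, pvRa, pvLu, pvLd, pvRu, pvRd]
           split_ifs <;> intro hx <;>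
             first | omega | (simp at hx; done) | (simp at hx; omega) | (simp at hx; exact hx.symm) | (simp only [List.getD_eq_getElem?_getD]; simp at hx; exact hx.symm))
    have ha : ((i+1) : Nat) < matrix.length := by
      first
        | omega
        | (revert hx
           simp only [pvUp, pvDn, pvLa, pvRa, pvLu, pvLd, pvRu, pvRd]
           split_ifs <;> intro hx <;>
             first | omega | (simp at hx; done) | (simp at hx; omega) | (simp at hx; exact hx.symm) | (simp only [List.getD_eq_getElem?_getD]; simp at hx; exact hx.symm))
    have hxval : x = (pvTr matrix ((i+1))).getD ((j-1)) "" := by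
      first
        | omega
        | (revert hx
           simp only [pvUp, pvDn, pvLa, pvRa, pvLu, pvLd, pvRu, pvRd]
           split_ifs <;> intro hx <;>
             first | omega | (simp at hx; done) | (simp at hx; omega) | (simp at hx; exact hx.symm) | (simp only [List.getD_eq_getElem?_getD]; simp at hx; exact hx.symm))
    rw [if_pos, hx, pvOptAdd, hcast1, hcast2,
      pvVal matrix hlen i j hi hj, pvVal matrix hlen ((i+1)) ((j-1)) ha hb, hxval, pvAdd2]
    all_goals first
        | omega
        | (revert hx
           simp only [pvUp, pvDn, pvLa, pvRa, pvLu, pvLd, pvRu, pvRd]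
           split_ifs <;> intro hx <;>
             first | omega | (simp at hx; done) | (simp at hx; omega) | (simp at hx; exact hx.symm) | (simp only [List.getD_eq_getElem?_getD]; simp at hx; exact hx.symm))


lemma pvDirRd (matrix : List (List String))
    (hlen : ∀ row ∈ matrix, pvW matrix ≤ row.length)
    (i j : Nat) (hi : i < matrix.length) (hj : j < pvW matrix)
    (s : PySem.Set (String × String)) :
    (if 0 ≤ (i:Int) + 1 ∧ (i:Int) + 1 < (matrix.length:Int) ∧ 0 ≤ (j:Int) + 1 ∧ (j:Int) + 1 < (pvW matrix:Int) then
      PySem.Set.add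
        (PySem.Set.add s
          (PySem.List.pyGetD (PySem.List.pyGetD matrix (i:Int) []) (j:Int) "",
           PySem.List.pyGetD (PySem.List.pyGetD matrix ((i:Int) + 1) []) ((j:Int) + 1) ""))
        (PySem.List.pyGetD (PySem.List.pyGetD matrix ((i:Int) + 1) []) ((j:Int) + 1) "",
         PySem.List.pyGetD (PySem.List.pyGetD matrix (i:Int) []) (j:Int) "")
    else s)
      = pvOptAdd s ((pvTr matrix i).getD j "") (pvRd matrix i j) := by
  by_cases h1 : (pvRd matrix i j) = none
  · rw [if_neg, h1, pvOptAdd]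
    revert h1
    simp only [pvUp, pvDn, pvLa, pvRa, pvLu, pvLd, pvRu, pvRd]
    split_ifs <;> simp <;> omega
  · obtain ⟨x, hx⟩ := Option.ne_none_iff_exists'.mp h1
    have hcast1 : ((i:Int) + 1) = (((i+1) : Nat) : Int) := by
      first
        | omega
        | (revert hx
           simp only [pvUp, pvDn, pvLa, pvRa, pvLu, pvLd, pvRu, pvRd]
           split_ifs <;> intro hx <;>
             first | omega | (simp at hx; done) | (simp at hx; omega) | (simp at hx; exact hx.symm) | (simp only [List.getD_eq_getElem?_getD]; simp at hx; exact hx.symm))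
    have hcast2 : ((j:Int) + 1) = (((j+1) : Nat) : Int) := by
      first
        | omega
        | (revert hx
           simp only [pvUp, pvDn, pvLa, pvRa, pvLu, pvLd, pvRu, pvRd]
           split_ifs <;> intro hx <;>
             first | omega | (simp at hx; done) | (simp at hx; omega) | (simp at hx; exact hx.symm) | (simp only [List.getD_eq_getElem?_getD]; simp at hx; exact hx.symm))
    have hb : ((j+1) : Nat) < pvW matrix := by
      first
        | omega
        | (revert hx
           simp only [pvUp, pvDn, pvLa, pvRa, pvLu, pvLd, pvRu, pvRd]
           split_ifs <;> intro hx <;>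
             first | omega | (simp at hx; done) | (simp at hx; omega) | (simp at hx; exact hx.symm) | (simp only [List.getD_eq_getElem?_getD]; simp at hx; exact hx.symm))
    have ha : ((i+1) : Nat) < matrix.length := by
      first
        | omega
        | (revert hx
           simp only [pvUp, pvDn, pvLa, pvRa, pvLu, pvLd, pvRu, pvRd]
           split_ifs <;> intro hx <;>
             first | omega | (simp at hx; done) | (simp at hx; omega) | (simp at hx; exact hx.symm) | (simp only [List.getD_eq_getElem?_getD]; simp at hx; exact hx.symm))
    have hxval : x = (pvTr matrix ((i+1))).getD ((j+1)) "" := by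
      first
        | omega
        | (revert hx
           simp only [pvUp, pvDn, pvLa, pvRa, pvLu, pvLd, pvRu, pvRd]
           split_ifs <;> intro hx <;>
             first | omega | (simp at hx; done) | (simp at hx; omega) | (simp at hx; exact hx.symm) | (simp only [List.getD_eq_getElem?_getD]; simp at hx; exact hx.symm))
    rw [if_pos, hx, pvOptAdd, hcast1, hcast2,
      pvVal matrix hlen i j hi hj, pvVal matrix hlen ((i+1)) ((j+1)) ha hb, hxval, pvAdd2]
    all_goals first
        | omega
        | (revert hx
           simp only [pvUp, pvDn, pvLa, pvRa, pvLu, pvLd, pvRu, pvRd]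
           split_ifs <;> intro hx <;>
             first | omega | (simp at hx; done) | (simp at hx; omega) | (simp at hx; exact hx.symm) | (simp only [List.getD_eq_getElem?_getD]; simp at hx; exact hx.symm))

lemma pvStepA_eq_chain (matrix : List (List String))
    (hlen : ∀ row ∈ matrix, pvW matrix ≤ row.length)
    (i j : Nat) (hi : i < matrix.length) (hj : j < pvW matrix)
    (s : PySem.Set (String × String)) :
    pvStepA matrix matrix.length (pvW matrix) i j s = pvChain matrix i j s := by
  simp only [pvStepA, DIRECTIONS_8, List.foldl_cons, List.foldl_nil,
    pvDirUp matrix hlen i j hi hj, pvDirDn matrix hlen i j hi hj,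
    pvDirLa matrix hlen i j hi hj, pvDirRa matrix hlen i j hi hj,
    pvDirLu matrix hlen i j hi hj, pvDirRu matrix hlen i j hi hj,
    pvDirLd matrix hlen i j hi hj, pvDirRd matrix hlen i j hi hj]
  rfl

lemma pvWinStep_eq_chain (matrix : List (List String)) (i j : Nat)
    (s : PySem.Set (String × String)) :
    pvWinStep (s, pvPrvT matrix i j) (pvColT matrix i j, pvNxtT matrix i j)
      = (pvChain matrix i j s, pvColT matrix i j) := by
  by_cases hj0 : j = 0
  · subst hj0
    by_cases hjm : 0 + 1 < pvW matrix <;>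
      simp only [pvWinStep, pvPrvT, pvNxtT, pvColT, pvChain, pvLa, pvLu, pvLd, pvRa, pvRu,
        pvRd, pvOptAdd, hjm, reduceIte, if_true, if_false, ite_true, ite_false] <;> rfl
  · by_cases hjm : j + 1 < pvW matrix <;>
      simp only [pvWinStep, pvPrvT, pvNxtT, pvColT, pvChain, pvLa, pvLu, pvLd, pvRa, pvRu,
        pvRd, pvOptAdd, hj0, hjm, reduceIte, if_true, if_false, ite_true, ite_false] <;> rfl

lemma pvCell (matrix : List (List String))
    (hlen : ∀ row ∈ matrix, pvW matrix ≤ row.length)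
    (i j : Nat) (hi : i < matrix.length) (hj : j < pvW matrix)
    (s : PySem.Set (String × String)) :
    pvWinStep (s, pvPrvT matrix i j) (pvColT matrix i j, pvNxtT matrix i j)
      = (pvStepA matrix matrix.length (pvW matrix) i j s, pvColT matrix i j) := by
  rw [pvWinStep_eq_chain, pvStepA_eq_chain matrix hlen i j hi hj]

-- fold of B's window steps over the columns of row i = fold of A's cell bodies
lemma pvInner (matrix : List (List String))
    (hlen : ∀ row ∈ matrix, pvW matrix ≤ row.length)
    (i : Nat) (hi : i < matrix.length) :
    ∀ (k jj : Nat), jj + k = pvW matrix → ∀ s,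
    (((List.range' jj k).map (fun j => (pvColT matrix i j, pvNxtT matrix i j))).foldl
        pvWinStep (s, pvPrvT matrix i jj)).1
      = (List.range' jj k).foldl
          (fun (s : PySem.Set (String × String)) (j : Nat) =>
            pvStepA matrix matrix.length (pvW matrix) (↑i) (↑j) s) s := by
  intro k
  induction k with
  | zero => intro jj h s; simp
  | succ k ih =>
    intro jj h s
    rw [List.range'_succ, List.map_cons, List.foldl_cons, List.foldl_cons,
      pvCell matrix hlen i jj hi (by omega),
      show pvColT matrix i jj = pvPrvT matrix i (jj + 1) by simp [pvPrvT]]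
    exact ih (jj + 1) (by omega) _

-- row k of the padded list 'vert'
def pvVR (matrix : List (List String)) (k : Nat) : List (Option String) :=
  if k = 0 ∨ k = matrix.length + 1 then List.replicate (pvW matrix) none
  else (pvTr matrix (k - 1)).map some

lemma pvTr_len (matrix : List (List String))
    (hlen : ∀ row ∈ matrix, pvW matrix ≤ row.length)
    (i : Nat) (hi : i < matrix.length) : (pvTr matrix i).length = pvW matrix := by
  have hmem : matrix.getD i [] ∈ matrix := by
    rw [List.getD_eq_getElem?_getD, List.getElem?_eq_getElem hi]
    exact List.getElem_mem hi
  rw [pvTr, List.length_take, Nat.min_eq_left (hlen _ hmem)]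

lemma pvVR_len (matrix : List (List String))
    (hlen : ∀ row ∈ matrix, pvW matrix ≤ row.length)
    (k : Nat) (hk : k ≤ matrix.length + 1) : (pvVR matrix k).length = pvW matrix := by
  unfold pvVR
  split_ifs with h
  · simp
  · rw [List.length_map, pvTr_len matrix hlen (k - 1) (by omega)]

lemma pvVR_fst (matrix : List (List String))
    (hlen : ∀ row ∈ matrix, pvW matrix ≤ row.length)
    (i j : Nat) (hi : i < matrix.length) (hj : j < pvW matrix) :
    (pvVR matrix i)[j]? = some (pvUp matrix i j) := by
  unfold pvVR pvUp
  by_cases hi0 : i = 0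
  · simp [hi0, List.getElem?_replicate, hj]
  · have hlt : j < (pvTr matrix (i - 1)).length := by
      rw [pvTr_len matrix hlen (i - 1) (by omega)]; exact hj
    rw [if_neg (show ¬ (i = 0 ∨ i = matrix.length + 1) from by omega), if_neg hi0,
      List.getElem?_map, List.getElem?_eq_getElem hlt]
    simp [List.getD_eq_getElem?_getD, List.getElem?_eq_getElem hlt]

lemma pvVR_snd (matrix : List (List String))
    (hlen : ∀ row ∈ matrix, pvW matrix ≤ row.length)
    (i j : Nat) (hi : i < matrix.length) (hj : j < pvW matrix) :
    (pvVR matrix (i + 2))[j]? = some (pvDn matrix i j) := by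
  unfold pvVR pvDn
  by_cases hin : i + 1 < matrix.length
  · have hlt : j < (pvTr matrix (i + 2 - 1)).length := by
      rw [pvTr_len matrix hlen (i + 2 - 1) (by omega)]; exact hj
    rw [if_neg (show ¬ (i + 2 = 0 ∨ i + 2 = matrix.length + 1) from by omega), if_pos hin,
      List.getElem?_map, List.getElem?_eq_getElem hlt]
    simp only [show i + 2 - 1 = i + 1 from by omega] at hlt ⊢
    simp [List.getD_eq_getElem?_getD, List.getElem?_eq_getElem hlt]
  · rw [if_pos (show (i + 2 = 0 ∨ i + 2 = matrix.length + 1) from by omega), if_neg hin]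
    simp [List.getElem?_replicate, hj]

lemma pvCols_eq (matrix : List (List String))
    (hlen : ∀ row ∈ matrix, pvW matrix ≤ row.length)
    (i : Nat) (hi : i < matrix.length) :
    List.zip (pvVR matrix i) (List.zip ((pvTr matrix i).map some) (pvVR matrix (i + 2)))
      = (List.range' 0 (pvW matrix)).map (fun j => pvColT matrix i j) := by
  have l1 : (pvVR matrix i).length = pvW matrix := pvVR_len matrix hlen i (by omega)
  have l2 : (pvTr matrix i).length = pvW matrix := pvTr_len matrix hlen i hi
  have l3 : (pvVR matrix (i + 2)).length = pvW matrix := pvVR_len matrix hlen (i + 2) (by omega)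
  apply List.ext_getElem
  · simp [l1, l2, l3]
  · intro j h1 h2
    have hj : j < pvW matrix := by simpa [l1, l2, l3] using h2
    have e1 : (pvVR matrix i)[j]'(by omega) = pvUp matrix i j := by
      rw [List.getElem_eq_iff]; exact pvVR_fst matrix hlen i j hi hj
    have e3 : (pvVR matrix (i + 2))[j]'(by omega) = pvDn matrix i j := by
      rw [List.getElem_eq_iff]; exact pvVR_snd matrix hlen i j hi hj
    rw [List.getElem_zip, List.getElem_zip, e1, e3]
    simp only [List.getElem_map, List.getElem_range', Nat.zero_add, Nat.one_mul]
    unfold pvColT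
    rw [List.getD_eq_getElem?_getD, List.getElem?_eq_getElem (l2 ▸ hj)]
    rfl

lemma pvWins_eq (matrix : List (List String)) (i : Nat) :
    List.zip ((List.range' 0 (pvW matrix)).map (fun j => pvColT matrix i j))
        (((List.range' 0 (pvW matrix)).map (fun j => pvColT matrix i j)).tail
          ++ [((none : Option String), (none : Option String), (none : Option String))])
      = (List.range' 0 (pvW matrix)).map (fun j => (pvColT matrix i j, pvNxtT matrix i j)) := by
  apply List.ext_getElem
  · simp [List.length_tail]; omega
  · intro j h1 h2
    have hj : j < pvW matrix := by simpa using h2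
    have e2 : ((((List.range' 0 (pvW matrix)).map (fun j => pvColT matrix i j)).tail
          ++ [((none : Option String), (none : Option String), (none : Option String))])[j]'
            (by exact List.lt_length_right_of_zip h1)) = pvNxtT matrix i j := by
      rw [List.getElem_eq_iff, List.getElem?_append, List.getElem?_tail]
      by_cases hj1 : j + 1 < pvW matrix
      · rw [if_pos (by simp [List.length_tail]; omega), List.getElem?_map,
          List.getElem?_range' (by omega)]
        simp [pvNxtT, hj1]
      · rw [if_neg (by simp [List.length_tail]; omega),
          show j - ((List.range' 0 (pvW matrix)).map (fun j => pvColT matrix i j)).tail.length = 0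
            from by simp [List.length_tail]; omega]
        simp [pvNxtT, hj1]
    rw [List.getElem_zip, e2]
    simp only [List.getElem_map, List.getElem_range', Nat.zero_add, Nat.one_mul]

-- the padded row list of port B, in closed form
lemma pvVert_getElem? (matrix : List (List String)) (k : Nat) (hk : k ≤ matrix.length + 1) :
    (([List.replicate (pvW matrix) (none : Option String)]
      ++ (List.range' 0 matrix.length).map (fun i => (pvTr matrix i).map some)
      ++ [List.replicate (pvW matrix) (none : Option String)]))[k]?
      = some (pvVR matrix k) := by
  rcases Nat.eq_zero_or_pos k with hk0 | hkpos
  · subst hk0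
    simp [pvVR]
  · rw [List.append_assoc, List.getElem?_append_right (by simp; omega)]
    simp only [List.length_cons, List.length_nil]
    by_cases hkn : k ≤ matrix.length
    · rw [List.getElem?_append, if_pos (by simp; omega), List.getElem?_map,
        List.getElem?_range' (by omega)]
      unfold pvVR
      rw [if_neg (by omega)]
      simp
    · have hk1 : k = matrix.length + 1 := by omega
      rw [List.getElem?_append, if_neg (by simp; omega)]
      unfold pvVR
      rw [if_pos (by omega)]
      simp [hk1]

lemma pvZ_eq (matrix : List (List String)) :
    List.zip
        ([List.replicate (pvW matrix) (none : Option String)]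
          ++ (List.range' 0 matrix.length).map (fun i => (pvTr matrix i).map some)
          ++ [List.replicate (pvW matrix) (none : Option String)])
        (List.zip ((List.range' 0 matrix.length).map (fun i => (pvTr matrix i).map some))
          (([List.replicate (pvW matrix) (none : Option String)]
            ++ (List.range' 0 matrix.length).map (fun i => (pvTr matrix i).map some)
            ++ [List.replicate (pvW matrix) (none : Option String)]).drop 2))
      = (List.range' 0 matrix.length).map
          (fun i => (pvVR matrix i, ((pvTr matrix i).map some, pvVR matrix (i + 2)))) := by
  apply List.ext_getElem
  · simp; omega
  · intro i h1 h2
    have hi : i < matrix.length := by simpa using h2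
    have e1 : (([List.replicate (pvW matrix) (none : Option String)]
        ++ (List.range' 0 matrix.length).map (fun i => (pvTr matrix i).map some)
        ++ [List.replicate (pvW matrix) (none : Option String)]))[i]'
          (by exact List.lt_length_left_of_zip h1) = pvVR matrix i := by
      rw [List.getElem_eq_iff]
      exact pvVert_getElem? matrix i (by omega)
    have e3 : ((([List.replicate (pvW matrix) (none : Option String)]
        ++ (List.range' 0 matrix.length).map (fun i => (pvTr matrix i).map some)
        ++ [List.replicate (pvW matrix) (none : Option String)]).drop 2)[i]'
          (by exact List.lt_length_right_of_zip (List.lt_length_right_of_zip h1)))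
          = pvVR matrix (i + 2) := by
      rw [List.getElem_eq_iff, List.getElem?_drop,
        show 2 + i = i + 2 from by omega]
      exact pvVert_getElem? matrix (i + 2) (by omega)
    rw [List.getElem_zip, List.getElem_zip, e1, e3]
    simp only [List.getElem_map, List.getElem_range', Nat.zero_add, Nat.one_mul]

lemma pvPortA_eq (matrix : List (List String)) :
    get_adjacent_pairs matrix
      = (List.range' 0 matrix.length).foldl
          (fun (s : PySem.Set (String × String)) (i : Nat) =>
            (List.range' 0 (pvW matrix)).foldl
              (fun (s : PySem.Set (String × String)) (j : Nat) =>
                pvStepA matrix matrix.length (pvW matrix) (↑i) (↑j) s) s) [] := by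
  simp only [get_adjacent_pairs]
  rw [show (PySem.List.pyGetD matrix 0 []) = matrix.getD 0 [] from
    PySem.List.pyGetD_zero matrix []]
  simp only [PySem.List.pyRange_zero_natCast, List.foldl_map, List.range_eq_range']
  unfold pvStepA pvW
  rfl

lemma pvPortB_eq (matrix : List (List String)) :
    get_adjacent_pairs_alt matrix
      = (([List.replicate (pvW matrix) (none : Option String)]
          ++ (List.range' 0 matrix.length).map (fun i => (pvTr matrix i).map some)
          ++ [List.replicate (pvW matrix) (none : Option String)]).zip
            (((List.range' 0 matrix.length).map (fun i => (pvTr matrix i).map some)).zip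
              (([List.replicate (pvW matrix) (none : Option String)]
                ++ (List.range' 0 matrix.length).map (fun i => (pvTr matrix i).map some)
                ++ [List.replicate (pvW matrix) (none : Option String)]).drop 2))).foldl
          pvRowStep [] := by
  simp only [get_adjacent_pairs_alt]
  rw [show (PySem.List.pyGetD matrix 0 []) = matrix.getD 0 [] from
    PySem.List.pyGetD_zero matrix []]
  rw [PySem.List.slice_from _ (a := 2) (by norm_num), show Int.toNat 2 = 2 from rfl]
  simp only [PySem.List.slice_to_natCast, Int.toNat_natCast]
  have hgrid : List.map (fun row => List.map some (List.take (matrix.getD 0 []).length row)) matrix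
      = (List.range' 0 matrix.length).map (fun i => (pvTr matrix i).map some) := by
    apply List.ext_getElem?
    intro i
    by_cases hi : i < matrix.length
    · rw [List.getElem?_map, List.getElem?_map, List.getElem?_range' (by omega),
        List.getElem?_eq_getElem hi]
      unfold pvTr pvW
      simp only [Option.map_some, Nat.zero_add, Nat.one_mul]
      rw [show matrix.getD i [] = matrix[i] from by
        rw [List.getD_eq_getElem?_getD, List.getElem?_eq_getElem hi]; rfl]
    · rw [List.getElem?_eq_none (by simp; omega), List.getElem?_eq_none (by simp; omega)]
  rw [hgrid]
  rfl

lemma pvRow_eq (matrix : List (List String))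
    (hlen : ∀ row ∈ matrix, pvW matrix ≤ row.length)
    (i : Nat) (hi : i < matrix.length) (s : PySem.Set (String × String)) :
    pvRowStep s (pvVR matrix i, ((pvTr matrix i).map some, pvVR matrix (i + 2)))
      = (List.range' 0 (pvW matrix)).foldl
          (fun (s : PySem.Set (String × String)) (j : Nat) =>
            pvStepA matrix matrix.length (pvW matrix) (↑i) (↑j) s) s := by
  simp only [pvRowStep]
  rw [pvCols_eq matrix hlen i hi, PySem.List.slice_from_one, pvWins_eq,
    show ((none, none, none) : Option String × Option String × Option String)
      = pvPrvT matrix i 0 from by simp [pvPrvT]]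
  exact pvInner matrix hlen i hi (pvW matrix) 0 (by omega) s

theorem pvMain (matrix : List (List String)) (hne : matrix ≠ [])
    (hlen : ∀ row ∈ matrix, pvW matrix ≤ row.length) :
    get_adjacent_pairs matrix = get_adjacent_pairs_alt matrix := by
  rw [pvPortA_eq, pvPortB_eq, pvZ_eq, List.foldl_map]
  apply PySem.List.foldl_congr_mem
  intro acc x hx
  have hxlt : x < matrix.length := by
    have := List.mem_range'_1.mp hx
    omega
  exact (pvRow_eq matrix hlen x hxlt acc).symm

-- ===== VERDICT (by name: the statement is the Claim_ definition above) =====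
theorem get_adjacent_pairs_spec : Claim_equal_get_adjacent_pairs := by
  intro matrix _hdom hpre
  unfold Spec_get_adjacent_pairs
  obtain ⟨hne, hlen⟩ := hpre
  apply pvMain matrix hne
  intro row hrow
  have h := hlen row hrow
  rwa [PySem.List.pyGetD_zero] at h
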